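-- pv_equiv track=rewrite | github.com/TaLoN1x/ciso-assistant-community | backend/chat/questionnaire.py | _extract_status_marker
-- ===== SOURCE A (Python) =====
-- def _extract_status_marker(text: str) -> str:
--     """Pull the verdict-bearing field out of an indexed passage's text body.
--
--     The indexer (see _text_for_applied_control / _text_for_requirement_assessment)
--     writes lines like "Status: To do" or "Result: Partially compliant".
--     Surfacing this in the context label makes it visible at a glance to the
--     LLM rather than buried mid-paragraph. Returns e.g. "status=to_do" or
--     "result=partially_compliant", or "" when neither marker is present.
--     """
--     if not text:
--         return ""
--     # Result wins over Status when both appear (RA carries both; Result is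
--     # the verdict-bearing one).
--     result_value = ""
--     status_value = ""
--     for line in text.split("\n"):
--         stripped = line.strip()
--         lower = stripped.lower()
--         if not result_value and lower.startswith("result:"):
--             result_value = stripped.split(":", 1)[1].strip()
--         elif not status_value and lower.startswith("status:"):
--             status_value = stripped.split(":", 1)[1].strip()
--     chosen = result_value or status_value
--     if not chosen:
--         return ""
--     key = "result" if result_value else "status"
--     normalized = chosen.lower().replace(" ", "_").replace("-", "_")
--     return f"{key}={normalized}"
-- ===== SOURCE B (Python) =====
-- def _extract_status_marker(text: str) -> str:
--     """Same result as A, built from two independent first-match searches."""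
--     def _first(prefix):
--         for line in text.split("\n"):
--             stripped = line.strip()
--             if stripped.lower().startswith(prefix):
--                 value = stripped.split(":", 1)[1].strip()
--                 if value:
--                     return value
--         return ""
--     result_value = _first("result:")
--     status_value = _first("status:")
--     chosen = result_value or status_value
--     if not chosen:
--         return ""
--     key = "result" if result_value else "status"
--     normalized = chosen.lower().replace(" ", "_").replace("-", "_")
--     return f"{key}={normalized}"
-- ===== Notes on version B (the rewrite author's own statement) =====
-- stated objective: simpler
-- what changed: A's single fused two-accumulator loop with an elif is replaced by a shared helper doing two independent first-non-empty-match searches (one per prefix), then the same selection and normalization.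
import Mathlib
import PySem

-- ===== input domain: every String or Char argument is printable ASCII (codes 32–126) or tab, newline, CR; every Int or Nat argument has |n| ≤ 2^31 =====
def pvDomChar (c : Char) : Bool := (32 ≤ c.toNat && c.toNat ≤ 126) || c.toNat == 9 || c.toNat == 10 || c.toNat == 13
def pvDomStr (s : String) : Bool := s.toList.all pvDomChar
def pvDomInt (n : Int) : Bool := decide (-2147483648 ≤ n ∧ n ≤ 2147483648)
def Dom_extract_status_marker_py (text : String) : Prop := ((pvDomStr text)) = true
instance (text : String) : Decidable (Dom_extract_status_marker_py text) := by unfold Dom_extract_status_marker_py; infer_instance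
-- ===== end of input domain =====

-- B replaces A's fused two-accumulator loop by two independent first-match searches via a shared helper (simpler decomposition, same cost).

-- ===== PORT A =====
-- stripped.split(":", 1)[1].strip() — only evaluated under startswith "result:"/"status:", where ":" occurs, so index 1 exists
def pvVal (stripped : String) : String :=
  PySem.Str.strip (((PySem.Str.splitMax? stripped ":" 1).getD []).getD 1 "")

def pvAStep (st : String × String) (line : String) : String × String :=
  let stripped := PySem.Str.strip line
  let lower := PySem.Str.lower stripped
  if st.1 = "" ∧ PySem.Str.startswith lower "result:" = true then
    (pvVal stripped, st.2)
  else if st.2 = "" ∧ PySem.Str.startswith lower "status:" = true then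
    (st.1, pvVal stripped)
  else st

def extract_status_marker_py (text : String) : String :=
  if text = "" then ""
  else
    let st := ((PySem.Str.split? text "\n").getD []).foldl pvAStep ("", "")
    let chosen := if st.1 = "" then st.2 else st.1
    if chosen = "" then ""
    else
      let key := if st.1 = "" then "status" else "result"
      let normalized := PySem.Str.replace (PySem.Str.replace (PySem.Str.lower chosen) " " "_") "-" "_"
      PySem.Str.join "" [key, "=", normalized]

-- ===== PORT B =====
def pvBFirst (pre : String) : List String → String
  | [] => ""
  | line :: rest =>
    let stripped := PySem.Str.strip line
    if PySem.Str.startswith (PySem.Str.lower stripped) pre = true then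
      let value := pvVal stripped
      if value = "" then pvBFirst pre rest else value
    else pvBFirst pre rest

def extract_status_marker_py_alt (text : String) : String :=
  let lines := (PySem.Str.split? text "\n").getD []
  let result_value := pvBFirst "result:" lines
  let status_value := pvBFirst "status:" lines
  let chosen := if result_value = "" then status_value else result_value
  if chosen = "" then ""
  else
    let key := if result_value = "" then "status" else "result"
    let normalized := PySem.Str.replace (PySem.Str.replace (PySem.Str.lower chosen) " " "_") "-" "_"
    PySem.Str.join "" [key, "=", normalized]

-- ===== PRECONDITION & SPEC =====
def Spec_extract_status_marker_py (text : String) (out : String) : Prop := out = extract_status_marker_py_alt text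
instance (text : String) (out : String) : Decidable (Spec_extract_status_marker_py text out) := by unfold Spec_extract_status_marker_py; infer_instance

-- ===== CLAIM (what is proved, stated in full; the proofs are below) =====
def Claim_equal_extract_status_marker_py : Prop := ∀ (text : String), Dom_extract_status_marker_py text → Spec_extract_status_marker_py text (extract_status_marker_py text)

-- ===== LEMMAS AND PROOFS =====

-- a line cannot start with both "result:" and "status:"
theorem pv_excl (l : String) (h : PySem.Str.startswith l "result:" = true) :
    PySem.Str.startswith l "status:" = false := by
  by_contra hc
  rw [Bool.not_eq_false] at hc
  rw [PySem.Str.startswith_eq, PySem.Chars.startswith_iff] at h hc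
  obtain ⟨t1, ht1⟩ := h
  obtain ⟨t2, ht2⟩ := hc
  rw [← ht2] at ht1
  simp at ht1

theorem pvBFirst_cons (pre line : String) (rest : List String) :
    pvBFirst pre (line :: rest) =
      if PySem.Str.startswith (PySem.Str.lower (PySem.Str.strip line)) pre = true then
        (if pvVal (PySem.Str.strip line) = "" then pvBFirst pre rest
         else pvVal (PySem.Str.strip line))
      else pvBFirst pre rest := rfl

theorem pvAStep_eq (r s line : String) :
    pvAStep (r, s) line =
      if r = "" ∧ PySem.Str.startswith (PySem.Str.lower (PySem.Str.strip line)) "result:" = true then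
        (pvVal (PySem.Str.strip line), s)
      else if s = "" ∧ PySem.Str.startswith (PySem.Str.lower (PySem.Str.strip line)) "status:" = true then
        (r, pvVal (PySem.Str.strip line))
      else (r, s) := rfl

theorem pv_fold (lines : List String) (r s : String) :
    lines.foldl pvAStep (r, s) =
      ((if r = "" then pvBFirst "result:" lines else r),
       (if s = "" then pvBFirst "status:" lines else s)) := by
  induction lines generalizing r s with
  | nil =>
    simp only [List.foldl_nil, pvBFirst]
    by_cases hre : r = "" <;> by_cases hse : s = "" <;> simp [hre, hse]
  | cons line rest ih =>
    rw [List.foldl_cons, pvAStep_eq, pvBFirst_cons, pvBFirst_cons]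
    by_cases hr : PySem.Str.startswith (PySem.Str.lower (PySem.Str.strip line)) "result:" = true
    · have hs := pv_excl _ hr
      simp only [hr, hs, and_true, Bool.false_eq_true, and_false, if_false, if_true]
      by_cases hre : r = ""
      · subst hre
        simp only [reduceIte, ih]
      · simp only [hre, ite_false, ih]
    · by_cases hs : PySem.Str.startswith (PySem.Str.lower (PySem.Str.strip line)) "status:" = true
      · simp only [hr, hs, and_true, Bool.false_eq_true, and_false, if_false, if_true]
        by_cases hse : s = ""
        · subst hse
          simp only [reduceIte, ih]
        · simp only [hse, ite_false, ih]
      · simp only [hr, hs, Bool.false_eq_true, and_false, if_false, ih]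

-- ===== VERDICT (by name: the statement is the Claim_ definition above) =====
theorem extract_status_marker_py_spec : Claim_equal_extract_status_marker_py := by
  intro text _
  unfold Spec_extract_status_marker_py extract_status_marker_py extract_status_marker_py_alt
  by_cases h0 : text = ""
  · subst h0; decide
  · simp only [if_neg h0, pv_fold, if_true]
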